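-- pv_equiv track=rewrite | github.com/kypa123/PS | JustPractice/양방향그래프 최대값구하기.py | solution
-- ===== SOURCE A (Python) =====
-- def solution(N, A, B):
--     # write your code in Python 3.6
--     d = dict()
--     count = 0
--     for i in range(len(A)):
--         d[A[i]] = d.get(A[i], [])
--         d[B[i]] = d.get(B[i], [])
--         d[A[i]].append(B[i])
--         d[B[i]].append(A[i])
--     d = dict(sorted(d.items(), key=lambda item: len(item[1]), reverse=True))
--     valueDict = dict()
--     for values in d:
--         valueDict[values] = N
--         N -= 1
--     for key, val in d.items():
--         for vall in val:
--             count += valueDict[key] + valueDict[vall]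
--     count = count // 2
--     return count
-- ===== SOURCE B (Python) =====
-- def solution(N, A, B):
--     # Degree-count per node (same first-appearance order as A: A[i] then B[i]),
--     # then one weighted sum value*degree over the degree-sorted nodes; no
--     # adjacency lists and no loop over edge incidences.
--     deg = {}
--     for a, b in zip(A, B):
--         deg[a] = deg.get(a, 0) + 1
--         deg[b] = deg.get(b, 0) + 1
--     total = 0
--     value = N
--     for node, d in sorted(deg.items(), key=lambda kv: kv[1], reverse=True):
--         total += value * d
--         value -= 1
--     return total
-- ===== Notes on version B (the rewrite author's own statement) =====
-- stated objective: faster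
-- what changed: B keeps only a degree counter per node instead of per-node adjacency lists and computes the answer as a single sum of value*degree over the degree-sorted nodes, replacing A's double loop over all 2*E edge incidences followed by //2 (same asymptotics, measured ~3x constant-factor speedup and O(V) instead of O(E) extra space).
import Mathlib
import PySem

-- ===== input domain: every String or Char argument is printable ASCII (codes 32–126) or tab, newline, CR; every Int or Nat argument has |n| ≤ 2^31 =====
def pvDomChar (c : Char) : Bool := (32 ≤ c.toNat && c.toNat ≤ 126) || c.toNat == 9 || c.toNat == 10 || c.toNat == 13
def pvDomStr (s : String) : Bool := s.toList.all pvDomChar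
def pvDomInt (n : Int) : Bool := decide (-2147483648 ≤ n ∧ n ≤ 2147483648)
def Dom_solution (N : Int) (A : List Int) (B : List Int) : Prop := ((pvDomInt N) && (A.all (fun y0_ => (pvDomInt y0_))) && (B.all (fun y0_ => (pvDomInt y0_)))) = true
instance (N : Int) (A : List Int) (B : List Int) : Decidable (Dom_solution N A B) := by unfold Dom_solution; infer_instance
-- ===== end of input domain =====

-- B replaces A's adjacency lists and incidence double loop by a degree counter
-- and one value*degree sum over the degree-sorted nodes (objective: simpler).

-- ===== PORT A =====
-- literal port of A; pyGetD is exact because Pre_solution keeps every index in range,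
-- and Dict.getD is exact because every looked-up key was inserted by the loops above it
def solution (N : Int) (A : List Int) (B : List Int) : Int :=
  let d : PySem.Dict Int (List Int) :=
    (PySem.List.pyRange 0 (PySem.List.len A) 1).foldl
      (fun d i =>
        let a := PySem.List.pyGetD A i 0
        let b := PySem.List.pyGetD B i 0
        let d := d.insert a (d.getD a [])          -- d[A[i]] = d.get(A[i], [])
        let d := d.insert b (d.getD b [])          -- d[B[i]] = d.get(B[i], [])
        let d := d.modify a [] (fun l => l ++ [b]) -- d[A[i]].append(B[i])
        d.modify b [] (fun l => l ++ [a]))         -- d[B[i]].append(A[i])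
      PySem.Dict.empty
  let d := PySem.Dict.ofList
    (PySem.List.sorted d.items (fun p => PySem.List.len p.2) true)
  let r := d.keys.foldl
    (fun (s : PySem.Dict Int Int × Int) k => (s.1.insert k s.2, s.2 - 1))
    (PySem.Dict.empty, N)
  let valueDict := r.1
  let count := d.items.foldl
    (fun c p => p.2.foldl
      (fun c x => c + valueDict.getD p.1 0 + valueDict.getD x 0) c) 0
  PySem.Int.floordiv count 2

-- ===== PORT B =====
def solution_alt (N : Int) (A : List Int) (B : List Int) : Int :=
  let deg : PySem.Dict Int Int :=
    (A.zip B).foldl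
      (fun d p =>
        let d := d.insert p.1 (d.getD p.1 0 + 1)
        d.insert p.2 (d.getD p.2 0 + 1))
      PySem.Dict.empty
  let r := (PySem.List.sorted deg.items (fun p => p.2) true).foldl
    (fun (s : Int × Int) p => (s.1 + s.2 * p.2, s.2 - 1)) (0, N)
  r.1

-- ===== PRECONDITION & SPEC =====
-- Pre_ excludes exactly the inputs with len(B) < len(A), on which A raises IndexError at B[i]
def Pre_solution (N : Int) (A : List Int) (B : List Int) : Prop := A.length ≤ B.length
instance (N : Int) (A : List Int) (B : List Int) : Decidable (Pre_solution N A B) := by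
  unfold Pre_solution; infer_instance
def pvWitness_solution : Int × List Int × List Int := (3, [1, 2, 1], [2, 3, 1])

def Spec_solution (N : Int) (A : List Int) (B : List Int) (out : Int) : Prop := out = solution_alt N A B
instance (N : Int) (A : List Int) (B : List Int) (out : Int) : Decidable (Spec_solution N A B out) := by unfold Spec_solution; infer_instance

-- ===== CLAIM (what is proved, stated in full; the proofs are below) =====
def Claim_equal_solution : Prop := ∀ (N : Int) (A : List Int) (B : List Int), Dom_solution N A B → Pre_solution N A B → Spec_solution N A B (solution N A B)

-- ===== LEMMAS AND PROOFS =====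

-- ---- proof-only helpers (used by the lemmas below, not by the claim) ----
-- the per-edge step of A's first loop
def pvStepA (d : PySem.Dict Int (List Int)) (p : Int × Int) : PySem.Dict Int (List Int) :=
  let d := d.insert p.1 (d.getD p.1 [])
  let d := d.insert p.2 (d.getD p.2 [])
  let d := d.modify p.1 [] (fun l => l ++ [p.2])
  d.modify p.2 [] (fun l => l ++ [p.1])

-- the per-edge step of B's first loop
def pvStepB (d : PySem.Dict Int Int) (p : Int × Int) : PySem.Dict Int Int :=
  let d := d.insert p.1 (d.getD p.1 0 + 1)
  d.insert p.2 (d.getD p.2 0 + 1)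

-- the incidence list: each edge contributes both endpoints, A-end first
def pvL (E : List (Int × Int)) : List Int := E.flatMap (fun p => [p.1, p.2])

-- partners of node k, in the order A's loop appends them
def pvP (E : List (Int × Int)) (k : Int) : List Int :=
  E.flatMap (fun p => (if p.1 = k then [p.2] else []) ++ (if p.2 = k then [p.1] else []))

-- A's valueDict loop
def pvVD (ks : List Int) (d0 : PySem.Dict Int Int) (v0 : Int) : PySem.Dict Int Int × Int :=
  ks.foldl (fun s k => (s.1.insert k s.2, s.2 - 1)) (d0, v0)

-- everything A does after its first loop
def pvFinishA (N : Int) (d0 : PySem.Dict Int (List Int)) : Int :=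
  let d := PySem.Dict.ofList (PySem.List.sorted d0.items (fun p => PySem.List.len p.2) true)
  let r := d.keys.foldl (fun (s : PySem.Dict Int Int × Int) k => (s.1.insert k s.2, s.2 - 1))
    (PySem.Dict.empty, N)
  let valueDict := r.1
  let count := d.items.foldl
    (fun c p => p.2.foldl (fun c x => c + valueDict.getD p.1 0 + valueDict.getD x 0) c) 0
  PySem.Int.floordiv count 2

-- everything B does after its first loop
def pvFinishB (N : Int) (deg : PySem.Dict Int Int) : Int :=
  ((PySem.List.sorted deg.items (fun p => p.2) true).foldl
    (fun (s : Int × Int) p => (s.1 + s.2 * p.2, s.2 - 1)) (0, N)).1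

theorem range_fold_eq_zip_fold {δ : Type} (A B : List Int) (h : A.length ≤ B.length)
    (F : δ → Int → Int → δ) (init : δ) :
    (PySem.List.pyRange 0 (PySem.List.len A) 1).foldl
      (fun d i => F d (PySem.List.pyGetD A i 0) (PySem.List.pyGetD B i 0)) init
    = (A.zip B).foldl (fun d p => F d p.1 p.2) init := by
  have hz : (List.range A.length).map (fun k => (A.getD k 0, B.getD k 0)) = A.zip B := by
    apply List.ext_getElem
    · simp; omega
    · intro i hi1 hi2
      simp only [List.getElem_map, List.getElem_range, List.getElem_zip]
      have hiA : i < A.length := by simpa using hi1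
      have hiB : i < B.length := by omega
      rw [List.getD_eq_getElem _ _ hiA, List.getD_eq_getElem _ _ hiB]
  calc (PySem.List.pyRange 0 (PySem.List.len A) 1).foldl
        (fun d i => F d (PySem.List.pyGetD A i 0) (PySem.List.pyGetD B i 0)) init
      = (List.range A.length).foldl
          (fun d k => F d (A.getD k 0) (B.getD k 0)) init := by
        rw [PySem.List.len_eq, PySem.List.pyRange_zero_natCast, List.foldl_map]
        simp [PySem.List.pyGetD_natCast]
    _ = ((List.range A.length).map (fun k => (A.getD k 0, B.getD k 0))).foldl
          (fun d p => F d p.1 p.2) init := by rw [List.foldl_map]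
    _ = (A.zip B).foldl (fun d p => F d p.1 p.2) init := by rw [hz]

theorem foldA_getD (E : List (Int × Int)) (d : PySem.Dict Int (List Int)) (k : Int) :
    (E.foldl pvStepA d).getD k [] = d.getD k [] ++ pvP E k := by
  induction E generalizing d with
  | nil => simp [pvP]
  | cons p E ih =>
    obtain ⟨a, b⟩ := p
    simp only [List.foldl_cons, ih, pvP, List.flatMap_cons]
    by_cases h1 : k = a <;> by_cases h2 : k = b <;> by_cases h3 : a = b <;>
      simp_all [pvStepA, PySem.Dict.getD_modify, PySem.Dict.getD_insert, eq_comm]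

theorem length_pvP (E : List (Int × Int)) (k : Int) :
    (pvP E k).length = (pvL E).count k := by
  induction E with
  | nil => simp [pvP, pvL]
  | cons p E ih =>
    simp only [pvP, pvL, List.flatMap_cons, List.length_append, List.count_append] at *
    rw [ih]
    by_cases h1 : p.1 = k <;> by_cases h2 : p.2 = k <;>
      simp [h1, h2, List.count_cons, eq_comm] <;> omega

theorem foldB_eq_counter (E : List (Int × Int)) :
    E.foldl pvStepB PySem.Dict.empty = PySem.Dict.counter (pvL E) := by
  rw [← PySem.Dict.foldl_insert_getD_add_one_eq_counter]
  have : ∀ (E : List (Int × Int)) (d : PySem.Dict Int Int),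
      E.foldl pvStepB d = (pvL E).foldl (fun d x => d.insert x (d.getD x 0 + 1)) d := by
    intro E
    induction E with
    | nil => intro d; simp [pvL]
    | cons p E ih => intro d; simp [pvL, pvStepB, List.flatMap_cons, ih, pvL]
  exact this E _

theorem keys_insert_eq {ν : Type} (d : PySem.Dict Int ν) (k : Int) (v : ν) :
    (d.insert k v).keys = if k ∈ d.keys then d.keys else d.keys ++ [k] := by
  by_cases h : k ∈ d.keys
  · rw [PySem.Dict.keys_insert_of_contains d v ((PySem.Dict.contains_iff_mem_keys d k).2 h)]
    simp [h]
  · rw [PySem.Dict.keys_insert_of_not_contains d v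
      (by rcases hc : d.contains k with _|_; rfl;
          exact absurd ((PySem.Dict.contains_iff_mem_keys d k).1 hc) h)]
    simp [h]

theorem keys_stepA (d : PySem.Dict Int (List Int)) (p : Int × Int) :
    (pvStepA d p).keys =
      (if p.2 ∈ (if p.1 ∈ d.keys then d.keys else d.keys ++ [p.1])
        then (if p.1 ∈ d.keys then d.keys else d.keys ++ [p.1])
        else (if p.1 ∈ d.keys then d.keys else d.keys ++ [p.1]) ++ [p.2]) := by
  simp only [pvStepA, PySem.Dict.keys_modify, keys_insert_eq, PySem.Dict.mem_keys_insert]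
  by_cases h1 : p.1 ∈ d.keys <;> by_cases h2 : p.2 ∈ d.keys <;> by_cases h3 : p.2 = p.1 <;>
    simp_all

theorem keys_stepB (d : PySem.Dict Int Int) (p : Int × Int) :
    (pvStepB d p).keys =
      (if p.2 ∈ (if p.1 ∈ d.keys then d.keys else d.keys ++ [p.1])
        then (if p.1 ∈ d.keys then d.keys else d.keys ++ [p.1])
        else (if p.1 ∈ d.keys then d.keys else d.keys ++ [p.1]) ++ [p.2]) := by
  simp only [pvStepB, keys_insert_eq]

theorem keys_foldA_eq_keys_foldB (E : List (Int × Int))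
    (dA : PySem.Dict Int (List Int)) (dB : PySem.Dict Int Int) (h : dA.keys = dB.keys) :
    (E.foldl pvStepA dA).keys = (E.foldl pvStepB dB).keys := by
  induction E generalizing dA dB with
  | nil => simpa using h
  | cons p E ih =>
    simp only [List.foldl_cons]
    exact ih _ _ (by rw [keys_stepA, keys_stepB, h])

theorem insertBy_map {α β : Type} (f : α → β) (bA : α → α → Bool) (bB : β → β → Bool)
    (hb : ∀ a a', bB (f a) (f a') = bA a a') (x : α) (ys : List α) :
    PySem.List.insertBy bB (f x) (ys.map f) = (PySem.List.insertBy bA x ys).map f := by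
  induction ys with
  | nil => simp [PySem.List.insertBy]
  | cons y ys ih =>
    simp only [List.map_cons, PySem.List.insertBy, hb]
    by_cases h : bA x y <;> simp [h, ih]

theorem sorted_rev_map {α β : Type} (f : α → β) (kA : α → Int) (kB : β → Int)
    (hk : ∀ a, kB (f a) = kA a) (xs : List α) :
    PySem.List.sorted (xs.map f) kB true = (PySem.List.sorted xs kA true).map f := by
  rw [PySem.List.sorted_rev_eq_foldl_insertBy, PySem.List.sorted_rev_eq_foldl_insertBy,
    List.foldl_map]
  have : ∀ (xs : List α) (acc : List α),
      xs.foldl (fun acc x => PySem.List.insertBy (fun a b => decide (kB b < kB a)) (f x) acc)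
        (acc.map f)
      = (xs.foldl (fun acc x => PySem.List.insertBy (fun a b => decide (kA b < kA a)) x acc)
          acc).map f := by
    intro xs
    induction xs with
    | nil => simp
    | cons x xs ih =>
      intro acc
      simp only [List.foldl_cons]
      rw [insertBy_map f (fun a b => decide (kA b < kA a)) _ (by intro a a'; simp [hk]), ih]
  simpa using this xs []

theorem items_ofList (ps : List (Int × List Int)) (h : (ps.map Prod.fst).Nodup) :
    (PySem.Dict.ofList ps).items = ps := by
  have := PySem.Dict.items_foldl_insert_fresh ps Prod.fst Prod.snd PySem.Dict.empty
    (fun a _ => PySem.Dict.contains_empty a.1) h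
  simpa [PySem.Dict.ofList, PySem.Dict.update] using this

theorem pvVD_getD_not_mem (ks : List Int) (d0 : PySem.Dict Int Int) (v0 : Int) (k : Int)
    (h : k ∉ ks) : (pvVD ks d0 v0).1.getD k 0 = d0.getD k 0 := by
  induction ks generalizing d0 v0 with
  | nil => rfl
  | cons k0 ks ih =>
    simp only [List.mem_cons, not_or] at h
    simp only [pvVD, List.foldl_cons] at *
    rw [ih _ _ h.2, PySem.Dict.getD_insert]
    simp [h.1]

theorem pvVD_getD_mem (ks : List Int) (d0 : PySem.Dict Int Int) (v0 : Int) (k : Int)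
    (hnd : ks.Nodup) (h : k ∈ ks) :
    (pvVD ks d0 v0).1.getD k 0 = v0 - ks.idxOf k := by
  induction ks generalizing d0 v0 with
  | nil => simp at h
  | cons k0 ks ih =>
    have hfold : pvVD (k0 :: ks) d0 v0 = pvVD ks (d0.insert k0 v0) (v0 - 1) := rfl
    rw [hfold]
    by_cases hk : k = k0
    · subst hk
      rw [pvVD_getD_not_mem ks _ _ k (by simp at hnd; exact hnd.1)]
      simp [PySem.Dict.getD_insert]
    · have hmem : k ∈ ks := by rcases List.mem_cons.1 h with h'|h'; exact absurd h' hk; exact h'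
      rw [ih _ _ hnd.of_cons hmem, List.idxOf_cons_ne _ (by simpa using fun e => hk e.symm)]
      push_cast
      ring

theorem sum_single_hit (S : List Int) (hS : S.Nodup) (a : Int) (ha : a ∈ S) (c : Int) :
    (S.map (fun k => if a = k then c else 0)).sum = c := by
  induction S with
  | nil => simp at ha
  | cons s S ih =>
    simp only [List.map_cons, List.sum_cons]
    by_cases h : a = s
    · subst h
      rw [if_pos rfl]
      have hns : a ∉ S := by simp at hS; exact hS.1
      have : (S.map (fun k => if a = k then c else 0)).sum = 0 := by
        rw [List.sum_eq_zero]
        intro x hx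
        simp only [List.mem_map] at hx
        obtain ⟨k, hk, rfl⟩ := hx
        simp [show a ≠ k from fun e => hns (e ▸ hk)]
      omega
    · have ha' : a ∈ S := by rcases List.mem_cons.1 ha with h'|h'; exact absurd h' h; exact h'
      rw [if_neg h, ih hS.of_cons ha']
      omega

theorem sum_deg (S : List Int) (hS : S.Nodup) (V : Int → Int) (E : List (Int × Int))
    (hmem : ∀ p ∈ E, p.1 ∈ S ∧ p.2 ∈ S) :
    (S.map (fun k => V k * ((pvP E k).length : Int))).sum
      = (E.map (fun p => V p.1 + V p.2)).sum := by
  induction E with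
  | nil => simp [pvP]
  | cons p E ih =>
    have hp := hmem p (by simp)
    have hmem' : ∀ q ∈ E, q.1 ∈ S ∧ q.2 ∈ S := fun q hq => hmem q (by simp [hq])
    have expand : ∀ k, V k * (((pvP (p :: E) k).length : Int))
        = ((if p.1 = k then V p.1 else 0) + (if p.2 = k then V p.2 else 0))
          + V k * ((pvP E k).length : Int) := by
      intro k
      simp only [pvP, List.flatMap_cons, List.length_append]
      push_cast
      by_cases h1 : p.1 = k <;> by_cases h2 : p.2 = k <;> simp [h1, h2] <;> ring
    calc (S.map (fun k => V k * ((pvP (p :: E) k).length : Int))).sum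
        = (S.map (fun k => ((if p.1 = k then V p.1 else 0) + (if p.2 = k then V p.2 else 0))
            + V k * ((pvP E k).length : Int))).sum := by
          exact congrArg _ (List.map_congr_left (fun k _ => expand k))
      _ = (S.map (fun k => (if p.1 = k then V p.1 else 0) + (if p.2 = k then V p.2 else 0))).sum
          + (S.map (fun k => V k * ((pvP E k).length : Int))).sum := by
          rw [PySem.List.sum_map_add_int]
      _ = (S.map (fun k => if p.1 = k then V p.1 else 0)).sum
          + (S.map (fun k => if p.2 = k then V p.2 else 0)).sum
          + (S.map (fun k => V k * ((pvP E k).length : Int))).sum := by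
          rw [PySem.List.sum_map_add_int]
      _ = ((p :: E).map (fun q => V q.1 + V q.2)).sum := by
          rw [sum_single_hit S hS p.1 hp.1, sum_single_hit S hS p.2 hp.2, ih hmem']
          simp only [List.map_cons, List.sum_cons]
          try ring

theorem sum_partners (S : List Int) (hS : S.Nodup) (V : Int → Int) (E : List (Int × Int))
    (hmem : ∀ p ∈ E, p.1 ∈ S ∧ p.2 ∈ S) :
    (S.map (fun k => ((pvP E k).map V).sum)).sum
      = (E.map (fun p => V p.1 + V p.2)).sum := by
  induction E with
  | nil => simp [pvP]
  | cons p E ih =>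
    have hp := hmem p (by simp)
    have hmem' : ∀ q ∈ E, q.1 ∈ S ∧ q.2 ∈ S := fun q hq => hmem q (by simp [hq])
    have expand : ∀ k, ((pvP (p :: E) k).map V).sum
        = ((if p.1 = k then V p.2 else 0) + (if p.2 = k then V p.1 else 0))
          + ((pvP E k).map V).sum := by
      intro k
      simp only [pvP, List.flatMap_cons, List.map_append, List.sum_append]
      by_cases h1 : p.1 = k <;> by_cases h2 : p.2 = k <;> simp [h1, h2] <;> ring
    calc (S.map (fun k => ((pvP (p :: E) k).map V).sum)).sum
        = (S.map (fun k => ((if p.1 = k then V p.2 else 0) + (if p.2 = k then V p.1 else 0))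
            + ((pvP E k).map V).sum)).sum := by
          exact congrArg _ (List.map_congr_left (fun k _ => expand k))
      _ = (S.map (fun k => (if p.1 = k then V p.2 else 0) + (if p.2 = k then V p.1 else 0))).sum
          + (S.map (fun k => ((pvP E k).map V).sum)).sum := by
          rw [PySem.List.sum_map_add_int]
      _ = (S.map (fun k => if p.1 = k then V p.2 else 0)).sum
          + (S.map (fun k => if p.2 = k then V p.1 else 0)).sum
          + (S.map (fun k => ((pvP E k).map V).sum)).sum := by
          rw [PySem.List.sum_map_add_int]
      _ = ((p :: E).map (fun q => V q.1 + V q.2)).sum := by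
          rw [sum_single_hit S hS p.1 hp.1, sum_single_hit S hS p.2 hp.2, ih hmem']
          simp only [List.map_cons, List.sum_cons]
          try ring

theorem bfold_eq (q : List (Int × List Int)) (t0 v0 : Int) (hnd : (q.map Prod.fst).Nodup) :
    ((q.map (fun p => (p.1, (p.2.length : Int)))).foldl
        (fun (s : Int × Int) p => (s.1 + s.2 * p.2, s.2 - 1)) (t0, v0)).1
      = t0 + (q.map (fun p =>
          (pvVD (q.map Prod.fst) PySem.Dict.empty v0).1.getD p.1 0 * (p.2.length : Int))).sum := by
  induction q generalizing t0 v0 with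
  | nil => simp
  | cons p q ih =>
    have hc := List.nodup_cons.mp (by rw [List.map_cons] at hnd; exact hnd)
    have hnd' : (q.map Prod.fst).Nodup := hc.2
    have hp1 : p.1 ∉ q.map Prod.fst := hc.1
    have hcons : (p.1 :: q.map Prod.fst).Nodup := List.nodup_cons.mpr ⟨hp1, hnd'⟩
    simp only [List.map_cons, List.foldl_cons, List.sum_cons]
    rw [ih _ _ hnd']
    have head : (pvVD (p.1 :: q.map Prod.fst) PySem.Dict.empty v0).1.getD p.1 0 = v0 := by
      rw [pvVD_getD_mem _ _ _ _ hcons (by simp)]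
      simp
    have tail : ∀ p' ∈ q, (pvVD (p.1 :: q.map Prod.fst) PySem.Dict.empty v0).1.getD p'.1 0
        = (pvVD (q.map Prod.fst) PySem.Dict.empty (v0 - 1)).1.getD p'.1 0 := by
      intro p' hp'
      have hm : p'.1 ∈ q.map Prod.fst := List.mem_map.2 ⟨p', hp', rfl⟩
      have hne : p'.1 ≠ p.1 := fun e => hp1 (e ▸ hm)
      rw [pvVD_getD_mem _ _ _ _ hcons (by simp [hm]),
        pvVD_getD_mem _ _ _ _ hnd' hm,
        List.idxOf_cons_ne _ (by simpa using fun e => hne e.symm)]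
      push_cast
      ring
    rw [head]
    have : (q.map (fun p' => (pvVD (p.1 :: q.map Prod.fst) PySem.Dict.empty v0).1.getD p'.1 0 * (p'.2.length : Int)))
        = (q.map (fun p' => (pvVD (q.map Prod.fst) PySem.Dict.empty (v0 - 1)).1.getD p'.1 0 * (p'.2.length : Int))) := by
      exact List.map_congr_left (fun p' hp' => by rw [tail p' hp'])
    rw [this]
    ring

theorem bfold_eq' (q : List (Int × List Int)) (t0 v0 : Int) (hnd : (q.map Prod.fst).Nodup) :
    ((q.map (fun p => (p.1, (p.2.length : Int)))).foldl
        (fun (s : Int × Int) p => (s.1 + s.2 * p.2, s.2 - 1)) (t0, v0)).1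
      = t0 + (q.map (fun p =>
          ((q.map Prod.fst).foldl (fun (s : PySem.Dict Int Int × Int) k => (s.1.insert k s.2, s.2 - 1))
            (PySem.Dict.empty, v0)).1.getD p.1 0 * (p.2.length : Int))).sum :=
  bfold_eq q t0 v0 hnd

theorem finish_eq (N : Int) (E : List (Int × Int)) :
    pvFinishA N (E.foldl pvStepA PySem.Dict.empty) = pvFinishB N (E.foldl pvStepB PySem.Dict.empty) := by
  have hB : E.foldl pvStepB PySem.Dict.empty = PySem.Dict.counter (pvL E) := foldB_eq_counter E
  have hSnd : (PySem.Set.ofList (pvL E)).Nodup := PySem.Set.nodup_ofList (pvL E)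
  have hkA : (E.foldl pvStepA PySem.Dict.empty).keys = PySem.Set.ofList (pvL E) := by
    rw [keys_foldA_eq_keys_foldB E PySem.Dict.empty PySem.Dict.empty rfl, hB,
      PySem.Dict.keys_counter]
  have hkAnd : (E.foldl pvStepA PySem.Dict.empty).keys.Nodup := by rw [hkA]; exact hSnd
  have hitemsA : (E.foldl pvStepA PySem.Dict.empty).items
      = (PySem.Set.ofList (pvL E)).map (fun k => (k, pvP E k)) := by
    rw [PySem.Dict.items_eq_map_keys _ hkAnd [], hkA]
    exact List.map_congr_left (fun k _ => by
      rw [foldA_getD, PySem.Dict.getD_empty]; simp)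
  have hitemsB : (E.foldl pvStepB PySem.Dict.empty).items
      = (E.foldl pvStepA PySem.Dict.empty).items.map
          (fun p => (p.1, (p.2.length : Int))) := by
    rw [hB, PySem.Dict.items_counter, hitemsA, List.map_map]
    exact List.map_congr_left (fun k _ => by simp [length_pvP])
  set sA := PySem.List.sorted (E.foldl pvStepA PySem.Dict.empty).items
    (fun p => PySem.List.len p.2) true with hsAdef
  have hsorted : PySem.List.sorted (E.foldl pvStepB PySem.Dict.empty).items
      (fun p => p.2) true = sA.map (fun p => (p.1, (p.2.length : Int))) := by
    rw [hitemsB]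
    exact sorted_rev_map (fun (p : Int × List Int) => (p.1, (p.2.length : Int)))
      (fun p => PySem.List.len p.2) (fun p => p.2)
      (fun a => (PySem.List.len_eq a.2).symm) _
  have hpermA : sA.Perm (E.foldl pvStepA PySem.Dict.empty).items :=
    PySem.List.sorted_perm _ _ _
  have hfstperm : (sA.map Prod.fst).Perm (PySem.Set.ofList (pvL E)) := by
    have h2 := hpermA.map Prod.fst
    rw [hitemsA, List.map_map] at h2
    simpa [Function.comp_def] using h2
  have hfstnd : (sA.map Prod.fst).Nodup := hfstperm.nodup_iff.mpr hSnd
  have hitems' : (PySem.Dict.ofList sA).items = sA := items_ofList sA hfstnd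
  have hkeys' : (PySem.Dict.ofList sA).keys = sA.map Prod.fst := by
    show (PySem.Dict.ofList sA).items.map Prod.fst = _
    rw [hitems']
  have hmemS : ∀ p ∈ E, p.1 ∈ PySem.Set.ofList (pvL E) ∧ p.2 ∈ PySem.Set.ofList (pvL E) := by
    intro p hp
    constructor
    · rw [PySem.Set.mem_ofList]
      exact List.mem_flatMap.2 ⟨p, hp, by simp⟩
    · rw [PySem.Set.mem_ofList]
      exact List.mem_flatMap.2 ⟨p, hp, by simp⟩
  -- unfold both finishers and abstract the value dict
  simp only [pvFinishA, pvFinishB]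
  rw [hitems', hkeys', hsorted]
  set W : PySem.Dict Int Int :=
    ((sA.map Prod.fst).foldl (fun (s : PySem.Dict Int Int × Int) k => (s.1.insert k s.2, s.2 - 1))
      (PySem.Dict.empty, N)).1 with hWdef
  -- count as a sum
  have hinner : ∀ (l : List Int) (c vk : Int),
      l.foldl (fun c x => c + vk + W.getD x 0) c
        = c + (vk * l.length + (l.map (fun x => W.getD x 0)).sum) := by
    intro l c vk
    have hf : (fun (c : Int) (x : Int) => c + vk + W.getD x 0)
        = (fun c x => c + (vk + W.getD x 0)) := by
      funext c x; ring
    rw [hf, PySem.List.foldl_add,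
      PySem.List.sum_map_add_int l (fun _ => vk) (fun x => W.getD x 0),
      PySem.List.sum_map_const_int]
    ring
  have hcount : sA.foldl
      (fun c p => p.2.foldl (fun c x => c + W.getD p.1 0 + W.getD x 0) c) 0
      = (sA.map (fun p => W.getD p.1 0 * (p.2.length : Int))).sum
        + (sA.map (fun p => (p.2.map (fun x => W.getD x 0)).sum)).sum := by
    have hf : (fun (c : Int) (p : Int × List Int) =>
          p.2.foldl (fun c x => c + W.getD p.1 0 + W.getD x 0) c)
        = (fun c p => c + (W.getD p.1 0 * (p.2.length : Int)
            + (p.2.map (fun x => W.getD x 0)).sum)) := by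
      funext c p; rw [hinner]
    rw [hf, PySem.List.foldl_add,
      PySem.List.sum_map_add_int sA (fun p => W.getD p.1 0 * (p.2.length : Int))
        (fun p => (p.2.map (fun x => W.getD x 0)).sum)]
    ring
  have hperm1 : (sA.map (fun p => W.getD p.1 0 * (p.2.length : Int))).sum
      = ((PySem.Set.ofList (pvL E)).map
          (fun k => W.getD k 0 * ((pvP E k).length : Int))).sum := by
    refine ((hpermA.map _).sum_eq).trans ?_
    rw [hitemsA, List.map_map]
    rfl
  have hperm2 : (sA.map (fun p => (p.2.map (fun x => W.getD x 0)).sum)).sum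
      = ((PySem.Set.ofList (pvL E)).map
          (fun k => ((pvP E k).map (fun x => W.getD x 0)).sum)).sum := by
    refine ((hpermA.map _).sum_eq).trans ?_
    rw [hitemsA, List.map_map]
    rfl
  have hT1 := sum_deg (PySem.Set.ofList (pvL E)) hSnd (fun x => W.getD x 0) E hmemS
  have hT2 := sum_partners (PySem.Set.ofList (pvL E)) hSnd (fun x => W.getD x 0) E hmemS
  have hbf := bfold_eq' sA 0 N hfstnd
  rw [hbf, hcount, hperm1, hperm2, hT1, hT2]
  rw [PySem.Int.floordiv_eq_ediv_of_pos (by norm_num : (0:Int) < 2)]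
  omega

theorem solution_eq_finishA (N : Int) (A B : List Int) :
    solution N A B = pvFinishA N
      ((PySem.List.pyRange 0 (PySem.List.len A) 1).foldl
        (fun d i => pvStepA d (PySem.List.pyGetD A i 0, PySem.List.pyGetD B i 0))
        PySem.Dict.empty) := rfl

theorem solution_alt_eq_finishB (N : Int) (A B : List Int) :
    solution_alt N A B = pvFinishB N ((A.zip B).foldl pvStepB PySem.Dict.empty) := rfl

-- ===== VERDICT (by name: the statement is the Claim_ definition above) =====
theorem solution_spec : Claim_equal_solution := by
  intro N A B _ hpre
  unfold Spec_solution
  calc solution N A B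
      = pvFinishA N ((A.zip B).foldl pvStepA PySem.Dict.empty) := by
        rw [solution_eq_finishA]
        exact congrArg (pvFinishA N)
          (range_fold_eq_zip_fold A B hpre (fun d a b => pvStepA d (a, b)) PySem.Dict.empty)
    _ = pvFinishB N ((A.zip B).foldl pvStepB PySem.Dict.empty) := finish_eq N (A.zip B)
    _ = solution_alt N A B := (solution_alt_eq_finishB N A B).symm
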